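-- pv_equiv track=rewrite | github.com/Vitor-Hugo-Dev/Projetos-Trybe | CienciaDaComputacao/sd-013-c-restaurant-orders/src/analyze_log.py | dias_nao_idos
-- ===== SOURCE A (Python) =====
-- def dias_nao_idos(cliente, lista):
--     dias = set()
--     nao_idos = set()
--     for linha in lista:
--         dias.add(linha[2])
--         if linha[0] == cliente:
--             nao_idos.add(linha[2])
--     return dias.difference(nao_idos)
-- ===== SOURCE B (Python) =====
-- def dias_nao_idos(cliente, lista):
--     # group-by-day index, then a per-day membership filter
--     por_dia = {}
--     for linha in lista:
--         por_dia.setdefault(linha[2], set()).add(linha[0])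
--     return {dia for dia, clientes in por_dia.items() if cliente not in clientes}
-- ===== Notes on version B (the rewrite author's own statement) =====
-- stated objective: alternative
-- what changed: Replaces the two parallel sets (all days, days the client visited) compared by set difference with a single dict grouping each day to the set of clients seen that day, then filtering the grouped items by membership of the client.
import Mathlib
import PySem

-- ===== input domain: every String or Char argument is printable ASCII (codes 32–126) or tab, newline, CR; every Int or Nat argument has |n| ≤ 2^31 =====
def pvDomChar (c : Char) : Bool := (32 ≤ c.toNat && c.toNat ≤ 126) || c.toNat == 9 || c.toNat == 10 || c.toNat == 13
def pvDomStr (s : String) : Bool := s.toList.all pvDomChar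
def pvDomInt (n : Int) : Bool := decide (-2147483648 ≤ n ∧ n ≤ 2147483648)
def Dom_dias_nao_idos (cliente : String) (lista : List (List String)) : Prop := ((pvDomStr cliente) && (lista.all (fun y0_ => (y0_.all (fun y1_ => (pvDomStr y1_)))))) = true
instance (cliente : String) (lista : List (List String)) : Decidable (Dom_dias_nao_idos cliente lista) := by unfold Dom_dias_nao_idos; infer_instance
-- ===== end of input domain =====

-- B groups rows by day into a dict day -> set of clients, then filters the grouped
-- items by membership of `cliente`; A keeps two parallel day-sets and takes a difference.

-- ===== PORT A =====
def dias_nao_idos (cliente : String) (lista : List (List String)) : List String :=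
  let st := lista.foldl
    (fun (s : PySem.Set String × PySem.Set String) linha =>
      (PySem.Set.add s.1 (PySem.List.pyGetD linha 2 ""),
       if PySem.List.pyGetD linha 0 "" == cliente then
         PySem.Set.add s.2 (PySem.List.pyGetD linha 2 "")
       else s.2))
    (PySem.Set.empty, PySem.Set.empty)
  PySem.Set.diff st.1 st.2

-- ===== PORT B =====
-- `por_dia.setdefault(linha[2], set()).add(linha[0])` mutates the set stored at the key:
-- as a value it is `insert key (add (getD key empty) linha[0])`.
def dias_nao_idos_alt (cliente : String) (lista : List (List String)) : List String :=
  let por_dia : PySem.Dict String (PySem.Set String) :=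
    lista.foldl
      (fun d linha =>
        PySem.Dict.insert d (PySem.List.pyGetD linha 2 "")
          (PySem.Set.add (PySem.Dict.getD d (PySem.List.pyGetD linha 2 "") PySem.Set.empty)
            (PySem.List.pyGetD linha 0 "")))
      PySem.Dict.empty
  PySem.Set.ofList
    (((PySem.Dict.items por_dia).filter
        (fun p => !(PySem.Set.contains p.2 cliente))).map Prod.fst)

-- ===== PRECONDITION & SPEC =====
-- Pre_ excludes exactly the inputs on which A raises IndexError: a row shorter than 3 items.
def Pre_dias_nao_idos (cliente : String) (lista : List (List String)) : Prop :=
  ∀ linha ∈ lista, 3 ≤ linha.length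
instance (cliente : String) (lista : List (List String)) : Decidable (Pre_dias_nao_idos cliente lista) := by unfold Pre_dias_nao_idos; infer_instance
def pvWitness_dias_nao_idos : String × List (List String) :=
  ("ana", [["bob", "10", "seg"], ["ana", "7", "ter"]])
def Spec_dias_nao_idos (cliente : String) (lista : List (List String)) (out : List String) : Prop := out = dias_nao_idos_alt cliente lista
instance (cliente : String) (lista : List (List String)) (out : List String) : Decidable (Spec_dias_nao_idos cliente lista out) := by unfold Spec_dias_nao_idos; infer_instance

-- ===== CLAIM (what is proved, stated in full; the proofs are below) =====
def Claim_equal_dias_nao_idos : Prop := ∀ (cliente : String) (lista : List (List String)), Dom_dias_nao_idos cliente lista → Pre_dias_nao_idos cliente lista → Spec_dias_nao_idos cliente lista (dias_nao_idos cliente lista)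

-- ===== LEMMAS AND PROOFS =====

-- B's dict after the loop has the same keys (in the same order) as A's `dias` set.
lemma keys_por_dia (l : List (List String)) :
    (l.foldl
      (fun d linha =>
        PySem.Dict.insert d (PySem.List.pyGetD linha 2 "")
          (PySem.Set.add (PySem.Dict.getD d (PySem.List.pyGetD linha 2 "") PySem.Set.empty)
            (PySem.List.pyGetD linha 0 "")))
      PySem.Dict.empty).keys
    = l.foldl (fun s linha => PySem.Set.add s (PySem.List.pyGetD linha 2 "")) PySem.Set.empty := by
  rw [PySem.Dict.keys_foldl_insert_key (key := fun linha => PySem.List.pyGetD linha 2 "")]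
  simp [PySem.Set.update, List.foldl_map, PySem.Set.empty]

-- membership invariant: `cliente` is in B's set for day k iff k is in A's `nao_idos` set
lemma mem_inv (cliente : String) (l : List (List String))
    (d : PySem.Dict String (PySem.Set String)) (nao : PySem.Set String)
    (h : ∀ k, PySem.Set.contains (PySem.Dict.getD d k PySem.Set.empty) cliente
              = PySem.Set.contains nao k) :
    ∀ k, PySem.Set.contains
        (PySem.Dict.getD
          (l.foldl
            (fun d linha =>
              PySem.Dict.insert d (PySem.List.pyGetD linha 2 "")
                (PySem.Set.add (PySem.Dict.getD d (PySem.List.pyGetD linha 2 "") PySem.Set.empty)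
                  (PySem.List.pyGetD linha 0 ""))) d)
          k PySem.Set.empty) cliente
      = PySem.Set.contains
          (l.foldl
            (fun s linha =>
              if PySem.List.pyGetD linha 0 "" == cliente then
                PySem.Set.add s (PySem.List.pyGetD linha 2 "")
              else s) nao) k := by
  induction l generalizing d nao with
  | nil => exact h
  | cons linha rest ih =>
    simp only [List.foldl_cons]
    apply ih
    intro k
    by_cases hk : k = PySem.List.pyGetD linha 2 ""
    · subst hk
      rw [PySem.Dict.getD_insert_self]
      by_cases hc : PySem.List.pyGetD linha 0 "" == cliente
      · have hc' : PySem.List.pyGetD linha 0 "" = cliente := by simpa using hc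
        simp only [hc, if_pos]
        simp [PySem.Set.add, PySem.Set.contains, hc']
        split_ifs <;> simp_all
      · simp only [hc, Bool.false_eq_true, if_neg, not_false_eq_true]
        rw [← h]
        have hc' : ¬ cliente = PySem.List.pyGetD linha 0 "" := by
          simp at hc; exact fun he => hc he.symm
        simp [PySem.Set.add, PySem.Set.contains]
        split_ifs <;> simp_all
    · rw [PySem.Dict.getD_insert, if_neg hk]
      rw [h]
      by_cases hc : PySem.List.pyGetD linha 0 "" == cliente
      · simp only [hc, if_pos]
        simp [PySem.Set.add, PySem.Set.contains]
        split_ifs <;> simp_all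
      · simp [hc]

theorem dias_nao_idos_spec : Claim_equal_dias_nao_idos := by
  intro cliente lista _hdom _hpre
  unfold Spec_dias_nao_idos dias_nao_idos dias_nao_idos_alt
  dsimp only
  rw [PySem.List.foldl_prod_mk
      (f := fun s linha => PySem.Set.add s (PySem.List.pyGetD linha 2 ""))
      (g := fun s linha =>
        if PySem.List.pyGetD linha 0 "" == cliente then
          PySem.Set.add s (PySem.List.pyGetD linha 2 "")
        else s)]
  have hnd :
      (lista.foldl
        (fun d linha =>
          PySem.Dict.insert d (PySem.List.pyGetD linha 2 "")
            (PySem.Set.add (PySem.Dict.getD d (PySem.List.pyGetD linha 2 "") PySem.Set.empty)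
              (PySem.List.pyGetD linha 0 ""))) PySem.Dict.empty).keys.Nodup :=
    PySem.Dict.nodup_keys_foldl_insert_key _ _ _ _ PySem.Dict.nodup_keys_empty
  rw [PySem.Dict.items_eq_map_keys _ hnd PySem.Set.empty]
  rw [List.filter_map, List.map_map]
  have hmem := mem_inv cliente lista PySem.Dict.empty PySem.Set.empty
    (by intro k; simp [PySem.Dict.getD_empty, PySem.Set.empty, PySem.Set.contains])
  have hfil :
      ((lista.foldl
        (fun d linha =>
          PySem.Dict.insert d (PySem.List.pyGetD linha 2 "")
            (PySem.Set.add (PySem.Dict.getD d (PySem.List.pyGetD linha 2 "") PySem.Set.empty)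
              (PySem.List.pyGetD linha 0 ""))) PySem.Dict.empty).keys.filter
        (fun k => !(PySem.Set.contains
          (PySem.Dict.getD
            (lista.foldl
              (fun d linha =>
                PySem.Dict.insert d (PySem.List.pyGetD linha 2 "")
                  (PySem.Set.add (PySem.Dict.getD d (PySem.List.pyGetD linha 2 "") PySem.Set.empty)
                    (PySem.List.pyGetD linha 0 ""))) PySem.Dict.empty)
            k PySem.Set.empty) cliente)))
      = ((lista.foldl
        (fun d linha =>
          PySem.Dict.insert d (PySem.List.pyGetD linha 2 "")
            (PySem.Set.add (PySem.Dict.getD d (PySem.List.pyGetD linha 2 "") PySem.Set.empty)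
              (PySem.List.pyGetD linha 0 ""))) PySem.Dict.empty).keys.filter
        (fun k => !(PySem.Set.contains
          (lista.foldl
            (fun s linha =>
              if PySem.List.pyGetD linha 0 "" == cliente then
                PySem.Set.add s (PySem.List.pyGetD linha 2 "")
              else s) PySem.Set.empty) k))) := by
    apply List.filter_congr
    intro k _
    rw [hmem k]
  simp only [Function.comp_def]
  rw [List.map_id', hfil, keys_por_dia]
  rw [PySem.Set.ofList_eq_self_of_nodup _ (List.Nodup.filter _ (keys_por_dia lista ▸ hnd))]
  rfl
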